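-- pv_equiv track=rewrite | github.com/MuhammadSawalhy/AI-IEEE-CS23-ZSB | Task 2 - Python 2/problem_3.py | get_max_min_sublists
-- ===== SOURCE A (Python) =====
-- def get_max_min_sublists(nums):
--     nums.sort()
--     n = len(nums)
--     i, j = 2, n - 2
--     while i < n and nums[i] < 0:
--         i += 1
--     while j > 0 and nums[j - 1] > 0:
--         j -= 1
--     return nums[j:], nums[:i]
-- ===== SOURCE B (Python) =====
-- def get_max_min_sublists(nums):
--     # Three-way sign partition: bucket the elements by sign in one pass, sort
--     # only the signed buckets, and the answers ARE whole buckets (padded to the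
--     # clamped 2-element slice when a bucket is too small); no boundary search.
--     negs, zeros, poss = [], [], []
--     for x in nums:
--         if x < 0:
--             negs.append(x)
--         elif x > 0:
--             poss.append(x)
--         else:
--             zeros.append(x)
--     negs.sort()
--     poss.sort()
--     nums[:] = negs + zeros + poss
--     mins = negs if len(negs) >= 2 else nums[:2]
--     maxs = poss if len(poss) >= 2 else nums[-2:]
--     return maxs, mins
-- ===== Notes on version B (the rewrite author's own statement) =====
-- stated objective: alternative
-- what changed: Instead of sorting the whole list and then searching for the sign boundaries with two marching while-loops, B three-way partitions the elements by sign in one pass, sorts only the negative and positive buckets, concatenates negs+zeros+poss, and returns whole buckets directly (falling back to the clamped 2-element end slices when a bucket has fewer than 2 elements) - there is no boundary search at all.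
import Mathlib
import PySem

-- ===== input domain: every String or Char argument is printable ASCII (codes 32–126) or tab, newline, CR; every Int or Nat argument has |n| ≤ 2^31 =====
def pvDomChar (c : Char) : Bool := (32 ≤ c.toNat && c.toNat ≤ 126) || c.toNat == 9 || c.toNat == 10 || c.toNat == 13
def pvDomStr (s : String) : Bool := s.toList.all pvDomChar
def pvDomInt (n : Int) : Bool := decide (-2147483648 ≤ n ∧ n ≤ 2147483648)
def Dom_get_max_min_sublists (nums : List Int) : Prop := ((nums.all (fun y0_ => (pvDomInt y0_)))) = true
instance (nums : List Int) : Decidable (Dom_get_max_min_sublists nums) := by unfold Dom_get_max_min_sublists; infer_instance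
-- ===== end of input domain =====

-- B replaces A's sort-then-march-pointers with a one-pass three-way sign partition:
-- sort only the signed buckets and return whole buckets (or the clamped 2-slice when a
-- bucket is too small) — no boundary search (objective: alternative). Both Pythons leave
-- the argument sorted in place; the equivalence proved here is about the RETURN value.

-- ===== PORT A =====
-- while i < n and nums[i] < 0: i += 1   (fuel-driven; fuel ≥ n - i suffices; the loop
-- only reads nums[i] under i < n with i ≥ 0, where pyGet? is some, so the .getD 0 is never hit)
def pvLoopI (s : List Int) (n : Int) (fuel : Nat) (i : Int) : Int :=
  match fuel with
  | 0 => i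
  | fuel + 1 =>
    if i < n ∧ (PySem.List.pyGet? s i).getD 0 < 0 then pvLoopI s n fuel (i + 1) else i

-- while j > 0 and nums[j - 1] > 0: j -= 1
def pvLoopJ (s : List Int) (fuel : Nat) (j : Int) : Int :=
  match fuel with
  | 0 => j
  | fuel + 1 =>
    if j > 0 ∧ (PySem.List.pyGet? s (j - 1)).getD 0 > 0 then pvLoopJ s fuel (j - 1) else j

def get_max_min_sublists (nums : List Int) : List Int × List Int :=
  let s := PySem.List.sorted nums (fun x => x) false
  let n : Int := s.length
  let i := pvLoopI s n s.length 2
  let j := pvLoopJ s s.length (n - 2)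
  (PySem.List.slice s (some j) none, PySem.List.slice s none (some i))

-- ===== PORT B =====
def get_max_min_sublists_alt (nums : List Int) : List Int × List Int :=
  -- one pass bucketing by sign (the Python loop appending to negs/zeros/poss)
  let p := nums.foldl
    (fun (acc : List Int × List Int × List Int) x =>
      if x < 0 then (acc.1 ++ [x], acc.2.1, acc.2.2)
      else if x > 0 then (acc.1, acc.2.1, acc.2.2 ++ [x])
      else (acc.1, acc.2.1 ++ [x], acc.2.2))
    ([], [], [])
  let negs := PySem.List.sorted p.1 (fun x => x) false
  let poss := PySem.List.sorted p.2.2 (fun x => x) false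
  let s := negs ++ (p.2.1 ++ poss)          -- nums[:] = negs + zeros + poss
  let mins := if 2 ≤ negs.length then negs else PySem.List.slice s none (some 2)
  let maxs := if 2 ≤ poss.length then poss else PySem.List.slice s (some (-2)) none
  (maxs, mins)

-- ===== PRECONDITION & SPEC =====
def Spec_get_max_min_sublists (nums : List Int) (out : List Int × List Int) : Prop := out = get_max_min_sublists_alt nums
instance (nums : List Int) (out : List Int × List Int) : Decidable (Spec_get_max_min_sublists nums out) := by unfold Spec_get_max_min_sublists; infer_instance

-- ===== CLAIM (what is proved, stated in full; the proofs are below) =====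
def Claim_equal_get_max_min_sublists : Prop := ∀ (nums : List Int), Dom_get_max_min_sublists nums → Spec_get_max_min_sublists nums (get_max_min_sublists nums)

-- ===== LEMMAS AND PROOFS =====

theorem pv_neg_char (s : List Int) (hs : s.Pairwise (· ≤ ·)) (k : Nat) (hk : k < s.length) :
    s[k] < 0 ↔ k < s.countP (fun x => decide (x < 0)) := by
  induction s generalizing k with
  | nil => simp at hk
  | cons a t ih =>
    rcases List.pairwise_cons.mp hs with ⟨ha, ht⟩
    by_cases h0 : a < 0
    · cases k with
      | zero =>
        simp [h0]
      | succ k =>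
        have hk' : k < t.length := by simpa using hk
        simp [h0, ih ht k hk']
    · have hz : t.countP (fun x => decide (x < 0)) = 0 := by
        rw [List.countP_eq_zero]
        intro b hb
        simp only [decide_eq_true_eq, not_lt]
        have := ha b hb
        omega
      cases k with
      | zero => simp [h0, hz]
      | succ k =>
        have hk' : k < t.length := by simpa using hk
        have := ih ht k hk'
        simp [h0, hz] at this ⊢
        omega

theorem pv_pos_char (s : List Int) (hs : s.Pairwise (· ≤ ·)) (k : Nat) (hk : k < s.length) :
    s[k] > 0 ↔ (s.length : Int) - s.countP (fun x => decide (x > 0)) ≤ (k : Int) := by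
  induction s generalizing k with
  | nil => simp at hk
  | cons a t ih =>
    rcases List.pairwise_cons.mp hs with ⟨ha, ht⟩
    by_cases h0 : a > 0
    · have hall : t.countP (fun x => decide (x > 0)) = t.length := by
        rw [List.countP_eq_length]
        intro b hb
        simp only [decide_eq_true_eq]
        have := ha b hb
        omega
      cases k with
      | zero => simp [h0, hall]
      | succ k =>
        have hk' : k < t.length := by simpa using hk
        have hb : t[k] > 0 := by
          have := ha t[k] (List.getElem_mem hk')
          omega
        simp [h0, hall, hb]
        omega
    · have hle : t.countP (fun x => decide (x > 0)) ≤ t.length := List.countP_le_length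
      cases k with
      | zero => simp [h0]; omega
      | succ k =>
        have hk' : k < t.length := by simpa using hk
        have := ih ht k hk'
        simp [h0] at this ⊢
        omega

theorem pv_get (s : List Int) (i : Int) (hi : 0 ≤ i) (h : i.toNat < s.length) :
    (PySem.List.pyGet? s i).getD 0 = s[i.toNat] := by
  have hcast : PySem.List.pyGet? s i = PySem.List.pyGet? s ((i.toNat : Nat) : Int) := by
    rw [Int.toNat_of_nonneg hi]
  rw [hcast, PySem.List.pyGet?_natCast, List.getElem?_eq_getElem h]
  rfl

theorem pv_loopI_eq (s : List Int) (hs : s.Pairwise (· ≤ ·)) (fuel : Nat) (i : Int)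
    (hi : 0 ≤ i) (hf : (s.length : Int) ≤ i + fuel) :
    pvLoopI s s.length fuel i = max i (s.countP (fun x => decide (x < 0)) : Int) := by
  have hC : s.countP (fun x => decide (x < 0)) ≤ s.length := List.countP_le_length
  induction fuel generalizing i with
  | zero =>
    simp only [pvLoopI]
    omega
  | succ fuel ih =>
    simp only [pvLoopI]
    by_cases hcond : i < (s.length : Int) ∧ (PySem.List.pyGet? s i).getD 0 < 0
    · rw [if_pos hcond]
      have hlt : i.toNat < s.length := by omega
      have hneg : s[i.toNat] < 0 := by rw [← pv_get s i hi hlt]; exact hcond.2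
      have hiC : (i : Int) < (s.countP (fun x => decide (x < 0)) : Int) := by
        have := (pv_neg_char s hs i.toNat hlt).mp hneg
        omega
      rw [ih (i + 1) (by omega) (by omega)]
      omega
    · rw [if_neg hcond]
      by_cases hin : i < (s.length : Int)
      · have hlt : i.toNat < s.length := by omega
        have hge : ¬ s[i.toNat] < 0 := by
          intro hneg
          exact hcond ⟨hin, by rw [pv_get s i hi hlt]; exact hneg⟩
        have := (pv_neg_char s hs i.toNat hlt)
        omega
      · omega

theorem pv_loopJ_eq (s : List Int) (hs : s.Pairwise (· ≤ ·)) (fuel : Nat) (j : Int)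
    (hj : j ≤ (s.length : Int)) (hf : j ≤ (fuel : Int)) :
    pvLoopJ s fuel j = min j ((s.length : Int) - s.countP (fun x => decide (x > 0))) := by
  have hC : s.countP (fun x => decide (x > 0)) ≤ s.length := List.countP_le_length
  induction fuel generalizing j with
  | zero =>
    simp only [pvLoopJ]
    omega
  | succ fuel ih =>
    simp only [pvLoopJ]
    by_cases hcond : j > 0 ∧ (PySem.List.pyGet? s (j - 1)).getD 0 > 0
    · rw [if_pos hcond]
      have hlt : (j - 1).toNat < s.length := by omega
      have hpos : s[(j - 1).toNat] > 0 := by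
        rw [← pv_get s (j - 1) (by omega) hlt]; exact hcond.2
      have hjU : ((s.length : Int) - s.countP (fun x => decide (x > 0))) ≤ j - 1 := by
        have := (pv_pos_char s hs (j - 1).toNat hlt).mp hpos
        omega
      rw [ih (j - 1) (by omega) (by omega)]
      omega
    · rw [if_neg hcond]
      by_cases hj0 : j > 0
      · have hlt : (j - 1).toNat < s.length := by omega
        have hge : ¬ s[(j - 1).toNat] > 0 := by
          intro hpos
          exact hcond ⟨hj0, by rw [pv_get s (j - 1) (by omega) hlt]; exact hpos⟩
        have := (pv_pos_char s hs (j - 1).toNat hlt)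
        omega
      · omega

-- B's bucketing fold produces the three sign filters (appended to the accumulators)
theorem pv_part (l : List Int) (a b c : List Int) :
    l.foldl
      (fun (acc : List Int × List Int × List Int) x =>
        if x < 0 then (acc.1 ++ [x], acc.2.1, acc.2.2)
        else if x > 0 then (acc.1, acc.2.1, acc.2.2 ++ [x])
        else (acc.1, acc.2.1 ++ [x], acc.2.2))
      (a, b, c)
    = (a ++ l.filter (fun x => decide (x < 0)),
       b ++ l.filter (fun x => decide (x = 0)),
       c ++ l.filter (fun x => decide (x > 0))) := by
  induction l generalizing a b c with
  | nil => simp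
  | cons x t ih =>
    by_cases h1 : x < 0
    · have h2 : ¬ x = 0 := by omega
      have h3 : ¬ x > 0 := by omega
      simp [List.foldl_cons, h1, h2, h3, ih]
    · by_cases h3 : x > 0
      · have h2 : ¬ x = 0 := by omega
        simp [List.foldl_cons, h1, h2, h3, ih]
      · have h2 : x = 0 := by omega
        simp [List.foldl_cons, h2, ih]

-- xs[len-2:] = xs[-2:] (both clamp the same way)
theorem pv_slice_last2 (xs : List Int) :
    PySem.List.slice xs (some ((xs.length : Int) - 2)) none
      = PySem.List.slice xs (some (-2)) none := by
  rw [PySem.List.slice_some_none, PySem.List.slice_some_none]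
  congr 1
  by_cases h : 2 ≤ xs.length
  · have e1 : ((xs.length : Int) - 2) = ((xs.length - 2 : Nat) : Int) := by omega
    have e2 : (-2 : Int) = -((2 : Nat) : Int) := by norm_num
    rw [e1, PySem.List.clampIdx_natCast, e2, PySem.List.clampIdx_neg_natCast xs.length 2 (by omega)]
    omega
  · have e1 : ((xs.length : Int) - 2) = -(((2 - xs.length : Nat)) : Int) := by omega
    have e2 : (-2 : Int) = -((2 : Nat) : Int) := by norm_num
    rw [e1, PySem.List.clampIdx_neg_natCast xs.length (2 - xs.length) (by omega),
        e2, PySem.List.clampIdx_neg_natCast xs.length 2 (by omega)]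
    omega

-- ===== VERDICT (by name: the statement is the Claim_ definition above) =====
theorem get_max_min_sublists_spec : Claim_equal_get_max_min_sublists := by
  intro nums _
  unfold Spec_get_max_min_sublists get_max_min_sublists get_max_min_sublists_alt
  simp only [pv_part nums [] [] []]
  simp only [List.nil_append]
  set fneg := nums.filter (fun x => decide (x < 0)) with hfneg
  set fzero := nums.filter (fun x => decide (x = 0)) with hfzero
  set fpos := nums.filter (fun x => decide (x > 0)) with hfpos
  set negs := PySem.List.sorted fneg (fun x => x) false with hnegs
  set poss := PySem.List.sorted fpos (fun x => x) false with hposs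
  set s := negs ++ (fzero ++ poss) with hs
  -- membership facts
  have hmn : ∀ x ∈ negs, x < 0 := by
    intro x hx
    rw [hnegs, PySem.List.mem_sorted] at hx
    simpa using (List.mem_filter.mp hx).2
  have hmz : ∀ x ∈ fzero, x = 0 := by
    intro x hx
    simpa using (List.mem_filter.mp hx).2
  have hmp : ∀ x ∈ poss, 0 < x := by
    intro x hx
    rw [hposs, PySem.List.mem_sorted] at hx
    simpa using (List.mem_filter.mp hx).2
  -- s is a sorted rearrangement of nums, hence IS the sorted list
  have hperm : s.Perm nums := by
    rw [List.perm_iff_count]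
    intro a
    have c1 : negs.count a = fneg.count a := (PySem.List.sorted_perm fneg (fun x => x) false).count_eq a
    have c2 : poss.count a = fpos.count a := (PySem.List.sorted_perm fpos (fun x => x) false).count_eq a
    simp only [hs, List.count_append, c1, c2, hfneg, hfzero, hfpos]
    have z : ∀ p : Int → Bool, ¬ p a = true → List.count a (nums.filter p) = 0 := by
      intro p hp
      exact List.count_eq_zero.mpr (fun h => hp (List.mem_filter.mp h).2)
    rcases lt_trichotomy a 0 with h | h | h
    · rw [List.count_filter (p := fun x => decide (x < 0)) (by simpa using h),
          z (fun x => decide (x = 0)) (by simp; omega),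
          z (fun x => decide (x > 0)) (by simp; omega)]
      omega
    · rw [List.count_filter (p := fun x => decide (x = 0)) (by simpa using h),
          z (fun x => decide (x < 0)) (by simp; omega),
          z (fun x => decide (x > 0)) (by simp; omega)]
      omega
    · rw [List.count_filter (p := fun x => decide (x > 0)) (by simpa using h),
          z (fun x => decide (x < 0)) (by simp; omega),
          z (fun x => decide (x = 0)) (by simp; omega)]
      omega
  have hpair : s.Pairwise (· ≤ ·) := by
    rw [hs, List.pairwise_append]
    refine ⟨PySem.List.sorted_pairwise fneg (fun x => x), ?_, ?_⟩
    · rw [List.pairwise_append]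
      refine ⟨?_, PySem.List.sorted_pairwise fpos (fun x => x), ?_⟩
      · exact List.pairwise_of_forall_mem_list (fun a ha b hb => by
          have := hmz a ha; have := hmz b hb; omega)
      · intro a ha b hb
        have := hmz a ha; have := hmp b hb; omega
    · intro a ha b hb
      have h1 := hmn a ha
      rcases List.mem_append.mp hb with h | h
      · have := hmz b h; omega
      · have := hmp b h; omega
  have hC : PySem.List.sorted nums (fun x => x) false = s :=
    PySem.List.sorted_id_eq_of_perm_of_pairwise nums s hperm hpair
  rw [hC]
  -- counts on s are the bucket lengths
  have hNcnt : s.countP (fun x => decide (x < 0)) = negs.length := by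
    rw [hs]
    simp only [List.countP_append]
    rw [List.countP_eq_length.mpr (by intro x hx; simpa using hmn x hx)]
    rw [List.countP_eq_zero.mpr (by intro x hx; have := hmz x hx; simpa using by omega)]
    rw [List.countP_eq_zero.mpr (by intro x hx; have := hmp x hx; simpa using by omega)]
    omega
  have hPcnt : s.countP (fun x => decide (x > 0)) = poss.length := by
    rw [hs]
    simp only [List.countP_append]
    rw [List.countP_eq_zero.mpr (by intro x hx; have := hmn x hx; simpa using by omega)]
    rw [List.countP_eq_zero.mpr (by intro x hx; have := hmz x hx; simpa using by omega)]
    rw [List.countP_eq_length.mpr (by intro x hx; simpa using hmp x hx)]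
    omega
  have hlen : s.length = negs.length + fzero.length + poss.length := by
    simp [hs]; omega
  -- evaluate A's two loops
  have hI := pv_loopI_eq s hpair s.length 2 (by omega) (by omega)
  have hJ := pv_loopJ_eq s hpair s.length ((s.length : Int) - 2) (by omega) (by omega)
  rw [hI, hJ, hNcnt, hPcnt]
  have e1 : min ((s.length : Int) - 2) ((s.length : Int) - poss.length)
      = (s.length : Int) - max 2 (poss.length : Int) := by omega
  rw [e1]
  -- now compare the two components branch by branch
  refine Prod.ext ?_ ?_
  · -- max sublist
    by_cases h : 2 ≤ poss.length
    · rw [if_pos h]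
      have e2 : (s.length : Int) - max 2 (poss.length : Int)
          = (((negs.length + fzero.length : Nat)) : Int) := by omega
      rw [e2, PySem.List.slice_from_natCast]
      show s.drop (negs.length + fzero.length) = poss
      rw [hs, ← List.append_assoc]
      have : (negs ++ fzero).length = negs.length + fzero.length := by simp
      rw [← this, List.drop_left]
    · rw [if_neg h]
      have e2 : (s.length : Int) - max 2 (poss.length : Int) = (s.length : Int) - 2 := by omega
      rw [e2, pv_slice_last2]
  · -- min sublist
    by_cases h : 2 ≤ negs.length
    · rw [if_pos h]
      have e2 : max 2 (negs.length : Int) = ((negs.length : Nat) : Int) := by omega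
      rw [e2, PySem.List.slice_to_natCast]
      show s.take negs.length = negs
      rw [hs, List.take_left]
    · rw [if_neg h]
      have e2 : max 2 (negs.length : Int) = ((2 : Nat) : Int) := by omega
      rw [e2]
      norm_num
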